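-- pv_equiv track=rewrite | github.com/nataliiaborovyk/ITS_Python | esame/blocco_1_tipi_dati/p1e01_slising_indice.py | balanced_load_index3
-- ===== SOURCE A (Python) =====
-- def balanced_load_index3(array:list[int]) -> int |None:
--     n=len(array)
--     somma_pari:int = sum(array[x] for x in range(0,n,2))
--     somma_dispari:int = 0
--     for index in range(n):
--         if index % 2 == 0:
--             somma_pari -= array[index]
--         if somma_dispari == somma_pari:
--             return index
--         if index % 2 == 1:
--             somma_dispari += array[index]
--     return None
-- ===== SOURCE B (Python) =====
-- def balanced_load_index3(array: list[int]) -> int | None: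
--     n = len(array)
--     # prefix_odd[i] = sum of array[j] for odd j < i  (forward cumulative pass)
--     prefix_odd = []
--     acc = 0
--     for i in range(n):
--         prefix_odd.append(acc)
--         if i % 2 == 1:
--             acc += array[i]
--     # suffix_even[i] = sum of array[j] for even j > i  (backward cumulative pass)
--     suffix_even = [0] * n
--     acc = 0
--     for i in range(n - 1, -1, -1):
--         suffix_even[i] = acc
--         if i % 2 == 0:
--             acc += array[i]
--     for i in range(n):
--         if prefix_odd[i] == suffix_even[i]:
--             return i
--     return None
-- ===== Notes on version B (the rewrite author's own statement) =====
-- stated objective: alternative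
-- what changed: Replaced A's single fused loop that mutates two running sums with a build-tables-then-compare decomposition: a forward pass building prefix_odd, a backward pass building suffix_even, and a final scan returning the first index where the tables agree.
import Mathlib
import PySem

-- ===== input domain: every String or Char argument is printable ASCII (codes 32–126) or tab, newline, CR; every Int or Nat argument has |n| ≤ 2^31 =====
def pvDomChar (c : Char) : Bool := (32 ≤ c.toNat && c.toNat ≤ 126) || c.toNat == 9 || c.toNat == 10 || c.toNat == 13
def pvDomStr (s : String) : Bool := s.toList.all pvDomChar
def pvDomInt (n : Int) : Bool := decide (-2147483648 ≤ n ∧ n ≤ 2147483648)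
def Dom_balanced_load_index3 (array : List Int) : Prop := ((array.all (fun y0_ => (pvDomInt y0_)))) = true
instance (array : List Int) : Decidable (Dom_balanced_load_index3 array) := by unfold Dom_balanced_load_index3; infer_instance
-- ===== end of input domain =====

-- B replaces A's single fused loop (mutating two running sums) by a build-tables-then-compare
-- decomposition: a forward prefix-odd pass, a backward suffix-even pass, then a first-match scan
-- (objective: alternative decomposition, same O(n) cost).

-- ===== PORT A =====
-- the fused loop: for index in range(n): subtract on even, compare, add on odd
def pvALoop (array : List Int) : List Int → Int → Int → Option Int
  | [], _, _ => none
  | index :: rest, somma_pari, somma_dispari =>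
    let somma_pari' := if PySem.Int.mod index 2 == 0
      then somma_pari - PySem.List.pyGetD array index 0 else somma_pari
    if somma_dispari == somma_pari' then some index
    else
      pvALoop array rest somma_pari'
        (if PySem.Int.mod index 2 == 1
          then somma_dispari + PySem.List.pyGetD array index 0 else somma_dispari)

def balanced_load_index3 (array : List Int) : Option Int :=
  let n : Int := PySem.List.len array
  let somma_pari : Int :=
    (PySem.List.pyRange 0 n 2).foldl (fun acc x => acc + PySem.List.pyGetD array x 0) 0
  pvALoop array (PySem.List.pyRange 0 n 1) somma_pari 0

-- ===== PORT B =====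
-- forward pass: prefix_odd[i] = sum of array[j] for odd j < i (acc threaded through)
def pvPrefixOdd : List Int → Nat → Int → List Int
  | [], _, _ => []
  | a :: rest, i, acc => acc :: pvPrefixOdd rest (i + 1) (if i % 2 == 1 then acc + a else acc)

-- backward pass: returns (suffix_even table, acc after also folding in index i)
def pvSuffixEven : List Int → Nat → List Int × Int
  | [], _ => ([], 0)
  | a :: rest, i =>
    let p := pvSuffixEven rest (i + 1)
    (p.2 :: p.1, if i % 2 == 0 then p.2 + a else p.2)

-- final scan: first i with prefix_odd[i] == suffix_even[i]
def pvFindBal : List (Int × Int) → Nat → Option Int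
  | [], _ => none
  | (p, s) :: rest, i => if p == s then some (i : Int) else pvFindBal rest (i + 1)

def balanced_load_index3_alt (array : List Int) : Option Int :=
  pvFindBal ((pvPrefixOdd array 0 0).zip (pvSuffixEven array 0).1) 0

-- ===== PRECONDITION & SPEC =====
def Spec_balanced_load_index3 (array : List Int) (out : Option Int) : Prop := out = balanced_load_index3_alt array
instance (array : List Int) (out : Option Int) : Decidable (Spec_balanced_load_index3 array out) := by unfold Spec_balanced_load_index3; infer_instance

-- ===== CLAIM (what is proved, stated in full; the proofs are below) =====
def Claim_equal_balanced_load_index3 : Prop := ∀ (array : List Int), Dom_balanced_load_index3 array → Spec_balanced_load_index3 array (balanced_load_index3 array)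

-- ===== LEMMAS AND PROOFS =====

-- even/odd-position sum of a list, used only to relate the two ports' initial sums
def pvEO : Bool → List Int → Int
  | _, [] => 0
  | true, a :: r => a + pvEO false r
  | false, _ :: r => pvEO true r

theorem pvSuffixEven_snd (tail : List Int) : ∀ (k : Nat),
    (pvSuffixEven tail k).2 = pvEO (k % 2 == 0) tail := by
  induction tail with
  | nil => intro k; simp [pvSuffixEven, pvEO]
  | cons a rest ih =>
    intro k
    rcases Nat.mod_two_eq_zero_or_one k with hk | hk
    · have h2 : (k + 1) % 2 = 1 := by omega
      simp [pvSuffixEven, ih (k + 1), h2, hk, pvEO]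
      ring
    · have h2 : (k + 1) % 2 = 0 := by omega
      simp [pvSuffixEven, ih (k + 1), h2, hk, pvEO]

theorem pvSumEven : ∀ (l : List Int),
    ((List.range ((l.length + 1) / 2)).map (fun k => l.getD (2 * k) 0)).sum = pvEO true l
  | [] => by simp [pvEO]
  | [a] => by simp [pvEO, List.range_succ]
  | a :: b :: r => by
    have hlen : ((a :: b :: r).length + 1) / 2 = (r.length + 1) / 2 + 1 := by
      simp; omega
    rw [hlen, List.range_succ_eq_map]
    simp only [List.map_cons, List.map_map, List.sum_cons]
    have : ((List.range ((r.length + 1) / 2)).map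
        ((fun k => (a :: b :: r).getD (2 * k) 0) ∘ Nat.succ)).sum
        = ((List.range ((r.length + 1) / 2)).map (fun k => r.getD (2 * k) 0)).sum := by
      apply congrArg
      apply List.map_congr_left
      intro k _
      show (a :: b :: r).getD (2 * (k+1)) 0 = r.getD (2 * k) 0
      have h1 : 2 * (k + 1) = 2 * k + 1 + 1 := by omega
      rw [h1]
      rfl
    rw [this, pvSumEven r]
    simp [pvEO, List.getD]

theorem pvMainLoop (array : List Int) : ∀ (tail : List Int) (k : Nat) (sd : Int),
    tail = array.drop k →
    pvALoop array (PySem.List.pyRange (k : Int) (array.length : Int) 1) ((pvSuffixEven tail k).2) sd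
      = pvFindBal ((pvPrefixOdd tail k sd).zip (pvSuffixEven tail k).1) k := by
  intro tail
  induction tail with
  | nil =>
    intro k sd h
    have hk : array.length ≤ k := by
      have hlen := List.length_drop (l := array) (i := k)
      rw [← h] at hlen
      simp at hlen
      omega
    rw [PySem.List.pyRange_one_eq_nil (by exact_mod_cast hk)]
    simp [pvALoop, pvPrefixOdd, pvFindBal]
  | cons a rest ih =>
    intro k sd h
    have hklt : k < array.length := by
      by_contra hge
      have : array.drop k = [] := List.drop_eq_nil_of_le (by omega)
      rw [this] at h; exact absurd h (by simp)
    have hget : PySem.List.pyGetD array (k : Int) 0 = a := by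
      rw [PySem.List.pyGetD_natCast, List.getD_eq_getElem?_getD]
      have h0 : array[k]? = (array.drop k)[0]? := by
        rw [List.getElem?_drop]
        rfl
      rw [h0, ← h]
      rfl
    have hrest : rest = array.drop (k + 1) := by
      have := congrArg (List.drop 1) h
      simpa [List.drop_drop, Nat.add_comm] using this
    rw [PySem.List.pyRange_one_cons (by exact_mod_cast hklt)]
    have hcast : ((k : Int) + 1) = ((k + 1 : Nat) : Int) := by push_cast; ring
    rw [hcast]
    have hmod : PySem.Int.mod (k : Int) 2 = ((k % 2 : Nat) : Int) := by
      exact_mod_cast PySem.Int.mod_natCast k 2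
    rcases Nat.mod_two_eq_zero_or_one k with hk2 | hk2
    · simp only [pvALoop, pvSuffixEven, pvPrefixOdd, pvFindBal, hget, hmod, hk2,
        List.zip_cons_cons]
      norm_num
      split_ifs with hsd
      · rfl
      · have := ih (k + 1) sd hrest
        rw [hcast]
        exact this
    · simp only [pvALoop, pvSuffixEven, pvPrefixOdd, pvFindBal, hget, hmod, hk2,
        List.zip_cons_cons]
      norm_num
      split_ifs with hsd
      · rfl
      · have := ih (k + 1) (sd + a) hrest
        rw [hcast]
        exact this

-- ===== VERDICT (by name: the statement is the Claim_ definition above) =====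
theorem balanced_load_index3_spec : Claim_equal_balanced_load_index3 := by
  intro array _
  unfold Spec_balanced_load_index3
  simp only [balanced_load_index3, balanced_load_index3_alt, PySem.List.len]
  have hinit :
      (PySem.List.pyRange 0 (array.length : Int) 2).foldl
        (fun acc x => acc + PySem.List.pyGetD array x 0) 0
        = (pvSuffixEven array 0).2 := by
    rw [pvSuffixEven_snd array 0]
    rw [PySem.List.pyRange_of_pos 0 (array.length : Int) (by norm_num)]
    rw [List.foldl_map, PySem.List.foldl_add]
    have hcount : (if (0 : Int) < (array.length : Int)
        then (((array.length : Int) - 0 + 2 - 1) / 2).toNat else 0)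
        = (array.length + 1) / 2 := by
      split_ifs with hpos
      · have h1 : ((array.length : Int) - 0 + 2 - 1) = ((array.length + 1 : Nat) : Int) := by
          push_cast; ring
        rw [h1, show ((array.length + 1 : Nat) : Int) / 2 = (((array.length + 1) / 2 : Nat) : Int)
          from (Int.natCast_ediv (array.length + 1) 2).symm]
        exact Int.toNat_natCast _
      · have : array.length = 0 := by omega
        simp [this]
    rw [hcount]
    have hfun : ∀ k : Nat, PySem.List.pyGetD array (0 + 2 * (k : Int)) 0 = array.getD (2 * k) 0 := by
      intro k
      rw [show (0 + 2 * (k : Int)) = ((2 * k : Nat) : Int) by push_cast; ring,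
        PySem.List.pyGetD_natCast]
    simp only [hfun]
    rw [pvSumEven array]
    simp
  rw [hinit]
  have hmain := pvMainLoop array array 0 0 (by simp)
  simpa using hmain
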